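-- pv_equiv track=rewrite | github.com/crhammond88/CodeArchive | Python/Practice/answer_guess.py | answer
-- ===== SOURCE A (Python) =====
-- def answer(limit=100):
--     test = -1
--     guess = -limit
--     answers = []
--     while guess < limit:
--         guess+=1
--         test = ((guess-9)**2)-81
--         if test == 0:
--             answers.append(guess)
--     return answers
-- ===== SOURCE B (Python) =====
-- def answer(limit=100):
--     # (x-9)**2 - 81 == 0 iff x == 0 or x == 18; A scans guesses -limit+1 .. limit.
--     return [x for x in (0, 18) if -limit < x <= limit]
-- ===== Notes on version B (the rewrite author's own statement) =====
-- stated objective: faster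
-- what changed: Solve (x-9)^2-81=0 algebraically (roots 0 and 18) and emit those inside (-limit, limit], replacing the O(limit) scan with a constant-time check.
import Mathlib
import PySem

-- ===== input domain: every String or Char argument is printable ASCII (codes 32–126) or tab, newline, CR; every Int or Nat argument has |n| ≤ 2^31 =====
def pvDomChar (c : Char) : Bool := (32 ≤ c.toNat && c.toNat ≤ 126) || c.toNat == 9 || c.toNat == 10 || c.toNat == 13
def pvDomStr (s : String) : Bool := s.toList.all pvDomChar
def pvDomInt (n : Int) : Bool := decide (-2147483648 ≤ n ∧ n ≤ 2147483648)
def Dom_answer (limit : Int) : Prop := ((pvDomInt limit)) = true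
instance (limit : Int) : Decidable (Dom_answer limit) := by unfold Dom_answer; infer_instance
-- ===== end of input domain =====

-- B: closed-form roots {0,18} filtered into (-limit, limit] instead of A's O(limit) scan (faster).
-- ===== PORT A =====
def answerGo (limit : Int) (test : Int) (guess : Int) (answers : List Int) : List Int :=
  if guess < limit then
    let guess' := guess + 1
    let test' := ((guess' - 9) ^ 2) - 81
    if test' = 0 then answerGo limit test' guess' (answers ++ [guess'])
    else answerGo limit test' guess' answers
  else answers
termination_by (limit - guess).toNat
decreasing_by all_goals omega

def answer (limit : Int) : List Int := answerGo limit (-1) (-limit) []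

-- ===== PORT B =====
def answer_alt (limit : Int) : List Int :=
  ([0, 18] : List Int).filter (fun x => decide (-limit < x) && decide (x ≤ limit))

-- ===== PRECONDITION & SPEC =====
def Spec_answer (limit : Int) (out : List Int) : Prop := out = answer_alt limit
instance (limit : Int) (out : List Int) : Decidable (Spec_answer limit out) := by unfold Spec_answer; infer_instance

-- ===== CLAIM (what is proved, stated in full; the proofs are below) =====
def Claim_equal_answer : Prop := ∀ (limit : Int), Dom_answer limit → Spec_answer limit (answer limit)

-- ===== LEMMAS AND PROOFS =====

lemma root_iff (x : Int) : ((x - 9) ^ 2) - 81 = 0 ↔ x = 0 ∨ x = 18 := by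
  constructor
  · intro h
    have h' : x * (x - 18) = 0 := by ring_nf; ring_nf at h; omega
    rcases mul_eq_zero.mp h' with h'' | h'' <;> omega
  · rintro (rfl | rfl) <;> norm_num

lemma answerGo_eq (limit : Int) (test guess : Int) (acc : List Int) :
    answerGo limit test guess acc =
      acc ++ ((if guess < 0 ∧ 0 ≤ limit then ([0] : List Int) else []) ++
              (if guess < 18 ∧ 18 ≤ limit then ([18] : List Int) else [])) := by
  rw [answerGo]
  by_cases h : guess < limit
  · rw [if_pos h]
    by_cases ht : ((guess + 1 - 9) ^ 2) - 81 = 0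
    · simp only
      rw [if_pos ht, answerGo_eq]
      rcases (root_iff (guess + 1)).mp ht with h0 | h18
      · have hg : guess = -1 := by omega
        subst hg
        norm_num
        have h0l : (0 : Int) ≤ limit := by omega
        simp [h0l]
      · have hg : guess = 17 := by omega
        subst hg
        norm_num
        omega
    · simp only
      rw [if_neg ht, answerGo_eq]
      have hr0 : guess + 1 ≠ 0 := fun hc => ht ((root_iff _).mpr (Or.inl hc))
      have hr18 : guess + 1 ≠ 18 := fun hc => ht ((root_iff _).mpr (Or.inr hc))
      have e0 : (guess + 1 < 0 ∧ 0 ≤ limit) ↔ (guess < 0 ∧ 0 ≤ limit) := by omega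
      have e18 : (guess + 1 < 18 ∧ 18 ≤ limit) ↔ (guess < 18 ∧ 18 ≤ limit) := by omega
      rw [if_congr e0 rfl rfl, if_congr e18 rfl rfl]
  · rw [if_neg h]
    have h0 : ¬ (guess < 0 ∧ 0 ≤ limit) := by omega
    have h18 : ¬ (guess < 18 ∧ 18 ≤ limit) := by omega
    rw [if_neg h0, if_neg h18]
    simp
termination_by (limit - guess).toNat
decreasing_by all_goals omega

lemma alt_eq (limit : Int) :
    answer_alt limit =
      (if -limit < 0 ∧ 0 ≤ limit then ([0] : List Int) else []) ++
      (if -limit < 18 ∧ 18 ≤ limit then ([18] : List Int) else []) := by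
  unfold answer_alt
  by_cases h0 : -limit < 0 ∧ 0 ≤ limit <;> by_cases h18 : -limit < 18 ∧ 18 ≤ limit <;>
    simp [List.filter_cons, List.filter_nil, decide_eq_true_eq, Bool.and_eq_true, h0, h18] <;>
      (split_ifs <;> simp)

-- ===== VERDICT =====
theorem answer_spec : Claim_equal_answer := by
  intro limit _
  unfold Spec_answer answer
  rw [answerGo_eq, alt_eq, List.nil_append]
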